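-- pv_equiv track=rewrite | github.com/xlcnd/isbnlib | isbnlib/dev/_helpers.py | cutoff_tokens
-- ===== SOURCE A (Python) =====
-- def cutoff_tokens(tokens, cutoff):
--     """Keep only the tokens with total length <= cutoff."""
--     ltokens = [len(t) for t in tokens]
--     length = 0
--     stokens = []
--     for token, l in zip(tokens, ltokens):
--         if length + l <= cutoff:
--             length = length + l
--             stokens.append(token)
--         else:
--             break
--     return stokens
-- ===== SOURCE B (Python) =====
-- def cutoff_tokens(tokens, cutoff):
--     """Keep only the tokens with total length <= cutoff."""
--     prefix = []
--     total = 0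
--     for t in tokens:
--         total += len(t)
--         prefix.append(total)
--     lo, hi = 0, len(prefix)
--     while lo < hi:
--         mid = (lo + hi) // 2
--         if cutoff < prefix[mid]:
--             hi = mid
--         else:
--             lo = mid + 1
--     return tokens[:lo]
-- ===== Notes on version B (the rewrite author's own statement) =====
-- stated objective: alternative
-- what changed: Replaces the accumulate-and-break loop with a prefix-sum table built once plus a binary search (bisect_right by hand, valid since lengths are non-negative) and a slice tokens[:k].
import Mathlib
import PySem

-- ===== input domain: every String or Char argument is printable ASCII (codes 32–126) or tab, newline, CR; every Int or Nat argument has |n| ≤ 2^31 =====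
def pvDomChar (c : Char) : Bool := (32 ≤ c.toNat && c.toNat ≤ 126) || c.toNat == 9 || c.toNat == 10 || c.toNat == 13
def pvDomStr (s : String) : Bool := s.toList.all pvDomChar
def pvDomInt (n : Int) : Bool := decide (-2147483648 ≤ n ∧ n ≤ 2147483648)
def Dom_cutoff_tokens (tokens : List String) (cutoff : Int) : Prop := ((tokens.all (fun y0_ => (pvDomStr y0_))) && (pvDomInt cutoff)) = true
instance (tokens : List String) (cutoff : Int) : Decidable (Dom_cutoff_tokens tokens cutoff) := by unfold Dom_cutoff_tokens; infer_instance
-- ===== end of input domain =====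

-- B builds the full prefix-sum table of token lengths and binary-searches the break point
-- instead of A's accumulate-and-break loop; objective: alternative (same result, different traversal).

-- ===== PORT A =====
-- the for-loop over zip(tokens, ltokens) with `break`, state (length, stokens)
def pvCtLoop (cutoff : Int) : List (String × Int) → Int → List String → List String
  | [], _, stokens => stokens
  | (token, l) :: rest, length, stokens =>
    if length + l ≤ cutoff then pvCtLoop cutoff rest (length + l) (stokens ++ [token])
    else stokens

def cutoff_tokens (tokens : List String) (cutoff : Int) : List String :=
  let ltokens := tokens.map PySem.Str.len
  pvCtLoop cutoff (tokens.zip ltokens) 0 []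

-- ===== PORT B =====
-- the prefix-building loop of Source B: running total, append total after each token
def pvPrefixSums : List String → Int → List Int
  | [], _ => []
  | t :: ts, total => (total + PySem.Str.len t) :: pvPrefixSums ts (total + PySem.Str.len t)

-- the while lo < hi binary-search loop of Source B
def pvBsearch (pre : List Int) (cutoff : Int) (lo hi : Int) : Int :=
  if h : lo < hi then
    let mid := PySem.Int.floordiv (lo + hi) 2
    if cutoff < (PySem.List.pyGet? pre mid).getD 0 then pvBsearch pre cutoff lo mid
    else pvBsearch pre cutoff (mid + 1) hi
  else lo
termination_by (hi - lo).toNat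
decreasing_by
  · have hlt : PySem.Int.floordiv (lo + hi) 2 < hi := by
      rw [PySem.Int.floordiv_lt_iff_lt_mul (by omega)]; omega
    omega
  · have hb := PySem.Int.floordiv_two_mid_bounds (lo := lo) (hi := hi) (le_of_lt h)
    omega

def cutoff_tokens_alt (tokens : List String) (cutoff : Int) : List String :=
  let pre := pvPrefixSums tokens 0
  let lo := pvBsearch pre cutoff 0 pre.length
  PySem.List.slice tokens none (some lo)   -- tokens[:lo]

-- ===== PRECONDITION & SPEC =====
def Spec_cutoff_tokens (tokens : List String) (cutoff : Int) (out : List String) : Prop := out = cutoff_tokens_alt tokens cutoff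
instance (tokens : List String) (cutoff : Int) (out : List String) : Decidable (Spec_cutoff_tokens tokens cutoff out) := by unfold Spec_cutoff_tokens; infer_instance

-- ===== CLAIM (what is proved, stated in full; the proofs are below) =====
def Claim_equal_cutoff_tokens : Prop := ∀ (tokens : List String) (cutoff : Int), Dom_cutoff_tokens tokens cutoff → Spec_cutoff_tokens tokens cutoff (cutoff_tokens tokens cutoff)

-- ===== LEMMAS AND PROOFS =====

-- number of leading tokens kept, starting from running length s
def pvCnt (ts : List String) (s x : Int) : Nat :=
  match ts with
  | [] => 0
  | t :: ts => if s + PySem.Str.len t ≤ x then pvCnt ts (s + PySem.Str.len t) x + 1 else 0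

theorem pvStrLen_nonneg (t : String) : 0 ≤ PySem.Str.len t := by
  simp [PySem.Str.len_eq]

theorem pvCnt_le_length (ts : List String) (s x : Int) : pvCnt ts s x ≤ ts.length := by
  induction ts generalizing s with
  | nil => simp [pvCnt]
  | cons t ts ih =>
    simp only [pvCnt, List.length_cons]
    split
    · exact Nat.succ_le_succ (ih _)
    · omega

theorem pvPrefixSums_length (ts : List String) (s : Int) :
    (pvPrefixSums ts s).length = ts.length := by
  induction ts generalizing s with
  | nil => rfl
  | cons t ts ih => simp [pvPrefixSums, ih]

theorem pvPrefixSums_ge (ts : List String) (s : Int) :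
    ∀ i : Nat, i < ts.length → s ≤ (pvPrefixSums ts s).getD i 0 := by
  induction ts generalizing s with
  | nil => intro i hi; simp at hi
  | cons t ts ih =>
    intro i hi
    cases i with
    | zero => simpa [pvPrefixSums] using pvStrLen_nonneg t
    | succ j =>
      have := ih (s + PySem.Str.len t) j (by simpa using Nat.lt_of_succ_lt_succ hi)
      have h0 := pvStrLen_nonneg t
      simp only [pvPrefixSums, List.getD_cons_succ]
      omega

theorem pvPrefixSums_le (ts : List String) (s x : Int) :
    ∀ i : Nat, i < pvCnt ts s x → (pvPrefixSums ts s).getD i 0 ≤ x := by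
  induction ts generalizing s with
  | nil => intro i hi; simp [pvCnt] at hi
  | cons t ts ih =>
    intro i hi
    simp only [pvCnt] at hi
    split at hi
    · cases i with
      | zero => simpa [pvPrefixSums] using ‹s + PySem.Str.len t ≤ x›
      | succ j =>
        simpa [pvPrefixSums] using ih (s + PySem.Str.len t) j (Nat.lt_of_succ_lt_succ hi)
    · omega

theorem pvPrefixSums_gt (ts : List String) (s x : Int) :
    ∀ i : Nat, pvCnt ts s x ≤ i → i < ts.length → x < (pvPrefixSums ts s).getD i 0 := by
  induction ts generalizing s with
  | nil => intro i _ hi; simp at hi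
  | cons t ts ih =>
    intro i hcnt hi
    simp only [pvCnt] at hcnt
    split at hcnt
    · cases i with
      | zero => omega
      | succ j =>
        simpa [pvPrefixSums] using
          ih (s + PySem.Str.len t) j (Nat.le_of_succ_le_succ hcnt)
            (by simpa using Nat.lt_of_succ_lt_succ hi)
    · cases i with
      | zero => simpa [pvPrefixSums] using lt_of_not_ge ‹¬ s + PySem.Str.len t ≤ x›
      | succ j =>
        have hge := pvPrefixSums_ge ts (s + PySem.Str.len t) j (by simpa using Nat.lt_of_succ_lt_succ hi)
        have hgt := lt_of_not_ge ‹¬ s + PySem.Str.len t ≤ x›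
        simp only [pvPrefixSums, List.getD_cons_succ]
        omega

-- binary search returns the (unique) boundary k
theorem pvBsearch_spec (ps : List Int) (x : Int) (k : Nat)
    (hle : ∀ i : Nat, i < k → ps.getD i 0 ≤ x)
    (hgt : ∀ i : Nat, k ≤ i → i < ps.length → x < ps.getD i 0) :
    ∀ (n : Nat) (lo hi : Int), (hi - lo).toNat = n → 0 ≤ lo → hi ≤ (ps.length : Int) →
      lo ≤ (k : Int) → (k : Int) ≤ hi → pvBsearch ps x lo hi = k := by
  intro n
  induction n using Nat.strong_induction_on with
  | _ n ihn =>
    intro lo hi hn hlo hhi hlok hkhi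
    rw [pvBsearch]
    by_cases h : lo < hi
    · simp only [h, dif_pos]
      have hb := PySem.Int.floordiv_two_mid_bounds (lo := lo) (hi := hi) (le_of_lt h)
      have hlt : PySem.Int.floordiv (lo + hi) 2 < hi := by
        rw [PySem.Int.floordiv_lt_iff_lt_mul (by omega)]; omega
      set mid := PySem.Int.floordiv (lo + hi) 2 with hmid
      have hmid0 : 0 ≤ mid := le_trans hlo hb.1
      have hmidn : mid = ((mid.toNat : Nat) : Int) := by omega
      have hmlen : mid.toNat < ps.length := by omega
      have hget : (PySem.List.pyGet? ps mid).getD 0 = ps.getD mid.toNat 0 := by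
        conv_lhs => rw [hmidn]
        rw [PySem.List.pyGet?_natCast, List.getD_eq_getElem?_getD]
      by_cases hc : x < (PySem.List.pyGet? ps mid).getD 0
      · simp only [hc, if_pos]
        have hkm : (k : Int) ≤ mid := by
          by_contra hk
          have : mid.toNat < k := by omega
          have := hle mid.toNat this
          rw [hget] at hc; omega
        exact ihn (mid - lo).toNat (by omega) lo mid rfl hlo (by omega) hlok hkm
      · simp only [hc, if_neg, not_false_iff]
        have hkm : mid + 1 ≤ (k : Int) := by
          by_contra hk
          have hki : k ≤ mid.toNat := by omega
          have := hgt mid.toNat hki hmlen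
          rw [hget] at hc; omega
        exact ihn (hi - (mid + 1)).toNat (by omega) (mid + 1) hi rfl (by omega) hhi hkm hkhi
    · simp only [h, dif_neg, not_false_iff]
      omega

theorem pvCtLoop_eq (x : Int) (ts : List String) :
    ∀ (s : Int) (acc : List String),
      pvCtLoop x (ts.zip (ts.map PySem.Str.len)) s acc = acc ++ ts.take (pvCnt ts s x) := by
  induction ts with
  | nil => intro s acc; simp [pvCtLoop, pvCnt]
  | cons t ts ih =>
    intro s acc
    simp only [List.map_cons, List.zip_cons_cons, pvCtLoop, pvCnt, PySem.Str.len_eq]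
    by_cases hc : s + (t.length : Int) ≤ x
    · have ih' := ih (s + PySem.Str.len t) (acc ++ [t])
      simp at ih'
      simp [hc, ih']
    · simp [hc]

theorem pvAlt_eq (ts : List String) (x : Int) :
    cutoff_tokens_alt ts x = ts.take (pvCnt ts 0 x) := by
  show PySem.List.slice ts none
      (some (pvBsearch (pvPrefixSums ts 0) x 0 ((pvPrefixSums ts 0).length : Int))) =
    List.take (pvCnt ts 0 x) ts
  have hlen := pvPrefixSums_length ts 0
  have hk := pvCnt_le_length ts 0 x
  have hb := pvBsearch_spec (pvPrefixSums ts 0) x (pvCnt ts 0 x)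
    (pvPrefixSums_le ts 0 x)
    (fun i h1 h2 => pvPrefixSums_gt ts 0 x i h1 (by omega))
    ((((pvPrefixSums ts 0).length : Int) - 0).toNat) 0 ((pvPrefixSums ts 0).length : Int) rfl
    (le_refl 0) (by omega) (by omega) (by omega)
  rw [hb, PySem.List.slice_to _ (by omega)]
  simp

-- ===== VERDICT (by name: the statement is the Claim_ definition above) =====
theorem cutoff_tokens_spec : Claim_equal_cutoff_tokens := by
  intro tokens cutoff _
  unfold Spec_cutoff_tokens cutoff_tokens
  rw [pvAlt_eq, pvCtLoop_eq cutoff tokens 0 []]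
  simp
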